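-- pv_equiv track=rewrite | github.com/issakeR-33/labs-PKPZ | lab2-task1/lab2-task1/lab2_task1.py | process_array
-- ===== SOURCE A (Python) =====
-- def process_array(arr):
--     """Обробка масиву згідно умови"""
--     arr = arr.copy()
--
--     # множина тих абсолютних значень, для яких є і +, і -
--     pairs = set()
--
--     for x in arr:
--         if x > 0 and -x in arr:
--             pairs.add(x)
--
--     # тепер змінюємо знаки тільки для чисел, які в цих парах
--     for i in range(len(arr)):
--         if abs(arr[i]) in pairs:
--             arr[i] = -arr[i]
--
--     return arr
-- ===== SOURCE B (Python) =====
-- def process_array(arr):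
--     # Sorted distinct values; a two-pointer inward scan finds every {v, -v} pair.
--     s = sorted(set(arr))
--     paired = set()
--     i, j = 0, len(s) - 1
--     while i < j:
--         t = s[i] + s[j]
--         if t == 0:
--             paired.add(s[j])
--             i += 1
--             j -= 1
--         elif t < 0:
--             i += 1
--         else:
--             j -= 1
--     return [-v if abs(v) in paired else v for v in arr]
-- ===== Notes on version B (the rewrite author's own statement) =====
-- stated objective: faster
-- what changed: Replaces A's quadratic scan ('-x in arr' list search for every element, then an index-loop rescan flipping by abs-membership) with a different algorithm: sort the distinct values once and detect all {v,-v} pairs with a two-pointer inward scan over the sorted list, then emit the result in one map.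
import Mathlib
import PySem

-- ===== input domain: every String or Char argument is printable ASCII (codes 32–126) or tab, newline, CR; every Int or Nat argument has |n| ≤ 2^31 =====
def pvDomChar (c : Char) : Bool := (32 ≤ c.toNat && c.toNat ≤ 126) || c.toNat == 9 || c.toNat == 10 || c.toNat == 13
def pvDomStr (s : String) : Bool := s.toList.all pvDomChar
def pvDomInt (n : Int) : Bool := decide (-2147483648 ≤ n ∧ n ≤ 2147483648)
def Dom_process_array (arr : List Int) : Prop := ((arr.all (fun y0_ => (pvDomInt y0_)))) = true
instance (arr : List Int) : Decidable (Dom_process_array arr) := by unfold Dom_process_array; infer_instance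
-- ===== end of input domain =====

-- B replaces A's quadratic scan-and-rescan (build a 'pairs' table by testing '-x in arr'
-- for every x, then flip by abs-membership over indices) with a different algorithm:
-- sort the distinct values once and find every {v, -v} pair with a two-pointer inward
-- scan over the sorted list, then emit the answer; objective: faster (measured; O(n log n)
-- pair detection vs A's quadratic '-x in arr' scans). A copies its argument and never mutates the caller's
-- list; B builds a fresh list too.

-- ===== PORT A =====
def process_array (arr : List Int) : List Int :=
  -- pairs = set(); for x in arr: if x > 0 and -x in arr: pairs.add(x)
  let pairs : PySem.Set Int :=
    arr.foldl (fun p x => if x > 0 ∧ -x ∈ arr then PySem.Set.add p x else p) PySem.Set.empty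
  -- for i in range(len(arr)): if abs(arr[i]) in pairs: arr[i] = -arr[i]
  (PySem.List.pyRange 0 (arr.length : Int) 1).foldl
    (fun l i =>
      if |PySem.List.pyGetD l i 0| ∈ pairs then
        PySem.List.pySetD l i (-(PySem.List.pyGetD l i 0))
      else l)
    arr

-- ===== PORT B =====
-- while i < j: t = s[i] + s[j]; == 0 → record s[j], move both; < 0 → i += 1; else j -= 1
def pvTwoPtr (s : List Int) (i j : Nat) (paired : PySem.Set Int) : PySem.Set Int :=
  if h : i < j then
    let t := s.getD i 0 + s.getD j 0
    if t = 0 then pvTwoPtr s (i + 1) (j - 1) (PySem.Set.add paired (s.getD j 0))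
    else if t < 0 then pvTwoPtr s (i + 1) j paired
    else pvTwoPtr s i (j - 1) paired
  else paired
termination_by j - i
decreasing_by all_goals omega

def process_array_alt (arr : List Int) : List Int :=
  let s := PySem.List.sorted (PySem.Set.ofList arr) (fun x => x) false
  let paired := pvTwoPtr s 0 (s.length - 1) PySem.Set.empty
  arr.map (fun v => if |v| ∈ paired then -v else v)

-- ===== PRECONDITION & SPEC =====
def Spec_process_array (arr : List Int) (out : List Int) : Prop := out = process_array_alt arr
instance (arr : List Int) (out : List Int) : Decidable (Spec_process_array arr out) := by unfold Spec_process_array; infer_instance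

-- ===== CLAIM (what is proved, stated in full; the proofs are below) =====
def Claim_equal_process_array : Prop := ∀ (arr : List Int), Dom_process_array arr → Spec_process_array arr (process_array arr)

-- ===== LEMMAS AND PROOFS =====

-- membership in A's fold-built 'pairs' set
theorem mem_pairs_fold (arr : List Int) (y : Int) :
    ∀ (l s : List Int),
      (y ∈ l.foldl (fun p x => if x > 0 ∧ -x ∈ arr then PySem.Set.add p x else p) s ↔
        y ∈ s ∨ (y ∈ l ∧ y > 0 ∧ -y ∈ arr)) := by
  intro l
  induction l with
  | nil => simp
  | cons x xs ih =>
    intro s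
    simp only [List.foldl_cons]
    by_cases h : x > 0 ∧ -x ∈ arr
    · rw [if_pos h, ih, PySem.Set.mem_add]
      constructor
      · rintro (⟨hs | rfl⟩ | hrest)
        · exact Or.inl hs
        · exact Or.inr ⟨List.mem_cons_self, h⟩
        · exact Or.inr ⟨List.mem_cons_of_mem _ hrest.1, hrest.2⟩
      · rintro (hs | ⟨hmem, hy⟩)
        · exact Or.inl (Or.inl hs)
        · rcases List.mem_cons.mp hmem with rfl | hmem'
          · exact Or.inl (Or.inr rfl)
          · exact Or.inr ⟨hmem', hy⟩
    · rw [if_neg h, ih]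
      constructor
      · rintro (hs | ⟨hmem, hy⟩)
        · exact Or.inl hs
        · exact Or.inr ⟨List.mem_cons_of_mem _ hmem, hy⟩
      · rintro (hs | ⟨hmem, hy⟩)
        · exact Or.inl hs
        · rcases List.mem_cons.mp hmem with rfl | hmem'
          · exact absurd ⟨hy.1, hy.2⟩ h
          · exact Or.inr ⟨hmem', hy⟩

theorem set_append_cons (pre : List Int) (x v : Int) (a : List Int) :
    (pre ++ x :: a).set pre.length v = pre ++ v :: a := by
  induction pre with
  | nil => rfl
  | cons p ps ih => simp [ih]

-- A's index loop over (pre ++ a), starting at index pre.length, maps the suffix a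
theorem loop_eq_map (pairs : List Int) :
    ∀ (a pre : List Int),
      (PySem.List.pyRange (pre.length : Int) ((pre.length : Int) + (a.length : Int)) 1).foldl
        (fun l i =>
          if |PySem.List.pyGetD l i 0| ∈ pairs then
            PySem.List.pySetD l i (-(PySem.List.pyGetD l i 0))
          else l)
        (pre ++ a)
      = pre ++ a.map (fun x => if |x| ∈ pairs then -x else x) := by
  intro a
  induction a with
  | nil =>
    intro pre
    rw [PySem.List.pyRange_one_eq_nil (by simp)]
    simp
  | cons x xs ih =>
    intro pre
    rw [PySem.List.pyRange_one_cons (by simp [List.length_cons])]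
    simp only [List.foldl_cons]
    have hget : PySem.List.pyGetD (pre ++ x :: xs) (pre.length : Int) 0 = x := by
      rw [PySem.List.pyGetD_natCast]
      simp [List.getD]
    have hmain :
        (if |PySem.List.pyGetD (pre ++ x :: xs) (pre.length : Int) 0| ∈ pairs then
            PySem.List.pySetD (pre ++ x :: xs) (pre.length : Int)
              (-(PySem.List.pyGetD (pre ++ x :: xs) (pre.length : Int) 0))
          else pre ++ x :: xs)
        = pre ++ (if |x| ∈ pairs then -x else x) :: xs := by
      rw [hget]
      by_cases hp : |x| ∈ pairs
      · rw [if_pos hp, if_pos hp, PySem.List.pySetD_natCast, set_append_cons]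
      · rw [if_neg hp, if_neg hp]
    rw [hmain]
    have hlen : ((pre.length : Int) + 1) = (((pre ++ [if |x| ∈ pairs then -x else x]).length : Int)) := by
      simp
    have hlen2 : ((pre.length : Int) + ((x :: xs).length : Int))
        = (((pre ++ [if |x| ∈ pairs then -x else x]).length : Int) + (xs.length : Int)) := by
      simp; omega
    rw [hlen, hlen2]
    simpa using ih (pre ++ [if |x| ∈ pairs then -x else x])

theorem process_array_eq_map (arr : List Int) :
    process_array arr
      = arr.map (fun x =>
          if |x| ∈ arr.foldl (fun p y => if y > 0 ∧ -y ∈ arr then PySem.Set.add p y else p)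
              PySem.Set.empty
          then -x else x) := by
  unfold process_array
  have := loop_eq_map
      (arr.foldl (fun p y => if y > 0 ∧ -y ∈ arr then PySem.Set.add p y else p) PySem.Set.empty)
      arr []
  simpa using this

-- strict index-monotonicity of a Pairwise-(<) list, stated via getD
theorem getD_strict_mono {s : List Int} (hs : s.Pairwise (· < ·))
    {p q : Nat} (hpq : p < q) (hq : q < s.length) :
    s.getD p 0 < s.getD q 0 := by
  rw [List.getD_eq_getElem s 0 (by omega), List.getD_eq_getElem s 0 hq]
  exact List.pairwise_iff_getElem.mp hs p q (by omega) hq hpq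

-- two-pointer correctness: on a strictly increasing list it collects exactly the
-- positive values whose negation also lies in the scanned index range
theorem mem_pvTwoPtr (s : List Int) (hs : s.Pairwise (· < ·)) :
    ∀ (i j : Nat) (acc : PySem.Set Int), ∀ (y : Int), j < s.length →
      (y ∈ pvTwoPtr s i j acc ↔
        y ∈ acc ∨ (0 < y ∧ (∃ p, i ≤ p ∧ p ≤ j ∧ s.getD p 0 = y) ∧
                            (∃ q, i ≤ q ∧ q ≤ j ∧ s.getD q 0 = -y))) := by
  intro i j acc
  induction i, j, acc using pvTwoPtr.induct s with
  | case1 i j acc h t ht ih =>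
    intro y hj
    have ht' : s.getD i 0 + s.getD j 0 = 0 := ht
    have hab : s.getD i 0 < s.getD j 0 := getD_strict_mono hs h hj
    have hbpos : 0 < s.getD j 0 := by omega
    rw [pvTwoPtr, dif_pos h, if_pos ht, ih y (by omega), PySem.Set.mem_add]
    constructor
    · rintro ((hacc | rfl) | ⟨hy, ⟨p, hp1, hp2, hp3⟩, ⟨q, hq1, hq2, hq3⟩⟩)
      · exact Or.inl hacc
      · exact Or.inr ⟨hbpos, ⟨j, by omega, by omega, rfl⟩, ⟨i, by omega, by omega, by omega⟩⟩
      · exact Or.inr ⟨hy, ⟨p, by omega, by omega, hp3⟩, ⟨q, by omega, by omega, hq3⟩⟩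
    · rintro (hacc | ⟨hy, ⟨p, hp1, hp2, hp3⟩, ⟨q, hq1, hq2, hq3⟩⟩)
      · exact Or.inl (Or.inl hacc)
      · by_cases hyb : y = s.getD j 0
        · exact Or.inl (Or.inr hyb)
        · have hpi : p ≠ i := by rintro rfl; omega
          have hpj : p ≠ j := by rintro rfl; exact hyb hp3.symm
          have hqi : q ≠ i := by rintro rfl; exact hyb (by omega)
          have hqj : q ≠ j := by rintro rfl; omega
          exact Or.inr ⟨hy, ⟨p, by omega, by omega, hp3⟩, ⟨q, by omega, by omega, hq3⟩⟩
  | case2 i j acc h t ht hlt ih =>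
    intro y hj
    have ht' : s.getD i 0 + s.getD j 0 < 0 := hlt
    rw [pvTwoPtr, dif_pos h, if_neg ht, if_pos hlt, ih y hj]
    constructor
    · rintro (hacc | ⟨hy, ⟨p, hp1, hp2, hp3⟩, ⟨q, hq1, hq2, hq3⟩⟩)
      · exact Or.inl hacc
      · exact Or.inr ⟨hy, ⟨p, by omega, hp2, hp3⟩, ⟨q, by omega, hq2, hq3⟩⟩
    · rintro (hacc | ⟨hy, ⟨p, hp1, hp2, hp3⟩, ⟨q, hq1, hq2, hq3⟩⟩)
      · exact Or.inl hacc
      · have hple : s.getD p 0 ≤ s.getD j 0 := by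
          rcases Nat.lt_or_ge p j with hl | hg
          · exact le_of_lt (getD_strict_mono hs hl hj)
          · have hpj : p = j := by omega
            rw [hpj]
        have hqle : s.getD q 0 ≤ s.getD j 0 := by
          rcases Nat.lt_or_ge q j with hl | hg
          · exact le_of_lt (getD_strict_mono hs hl hj)
          · have hqj : q = j := by omega
            rw [hqj]
        have hpi : p ≠ i := by rintro rfl; omega
        have hqi : q ≠ i := by rintro rfl; omega
        exact Or.inr ⟨hy, ⟨p, by omega, hp2, hp3⟩, ⟨q, by omega, hq2, hq3⟩⟩
  | case3 i j acc h t ht hlt ih =>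
    intro y hj
    have ht' : ¬ (s.getD i 0 + s.getD j 0 = 0) := ht
    have hlt' : ¬ (s.getD i 0 + s.getD j 0 < 0) := hlt
    rw [pvTwoPtr, dif_pos h, if_neg ht, if_neg hlt, ih y (by omega)]
    constructor
    · rintro (hacc | ⟨hy, ⟨p, hp1, hp2, hp3⟩, ⟨q, hq1, hq2, hq3⟩⟩)
      · exact Or.inl hacc
      · exact Or.inr ⟨hy, ⟨p, hp1, by omega, hp3⟩, ⟨q, hq1, by omega, hq3⟩⟩
    · rintro (hacc | ⟨hy, ⟨p, hp1, hp2, hp3⟩, ⟨q, hq1, hq2, hq3⟩⟩)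
      · exact Or.inl hacc
      · have hpge : s.getD i 0 ≤ s.getD p 0 := by
          rcases Nat.lt_or_ge i p with hl | hg
          · exact le_of_lt (getD_strict_mono hs hl (by omega))
          · have hpi : p = i := by omega
            rw [hpi]
        have hqge : s.getD i 0 ≤ s.getD q 0 := by
          rcases Nat.lt_or_ge i q with hl | hg
          · exact le_of_lt (getD_strict_mono hs hl (by omega))
          · have hqi : q = i := by omega
            rw [hqi]
        have hpj : p ≠ j := by rintro rfl; omega
        have hqj : q ≠ j := by rintro rfl; omega
        exact Or.inr ⟨hy, ⟨p, hp1, by omega, hp3⟩, ⟨q, hq1, by omega, hq3⟩⟩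
  | case4 i j acc h =>
    intro y hj
    rw [pvTwoPtr, dif_neg h]
    constructor
    · exact Or.inl
    · rintro (hacc | ⟨hy, ⟨p, hp1, hp2, hp3⟩, ⟨q, hq1, hq2, hq3⟩⟩)
      · exact hacc
      · exfalso
        have hpq : p = q := by omega
        subst hpq
        omega

-- the paired set B builds is exactly {y | 0 < y ∧ y ∈ arr ∧ -y ∈ arr}
theorem mem_paired_char (arr : List Int) (y : Int) :
    (y ∈ pvTwoPtr (PySem.List.sorted (PySem.Set.ofList arr) (fun x => x) false) 0
        ((PySem.List.sorted (PySem.Set.ofList arr) (fun x => x) false).length - 1)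
        PySem.Set.empty)
      ↔ (0 < y ∧ y ∈ arr ∧ -y ∈ arr) := by
  set s := PySem.List.sorted (PySem.Set.ofList arr) (fun x => x) false with hsdef
  have hmem : ∀ z : Int, z ∈ s ↔ z ∈ arr := by
    intro z
    rw [hsdef, PySem.List.mem_sorted, PySem.Set.mem_ofList]
  by_cases hnil : s = []
  · rw [hnil]
    have harr : arr = [] := by
      cases arr with
      | nil => rfl
      | cons a as =>
        exfalso
        have : a ∈ s := (hmem a).mpr List.mem_cons_self
        rw [hnil] at this
        exact absurd this (List.not_mem_nil)
    rw [pvTwoPtr]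
    simp [harr, PySem.Set.empty]
  · have hlen : 0 < s.length := List.length_pos_of_ne_nil hnil
    have hs : s.Pairwise (· < ·) := by
      rw [hsdef]; exact PySem.List.sorted_ofList_pairwise_lt arr
    have hidx : ∀ z : Int, (∃ p, 0 ≤ p ∧ p ≤ s.length - 1 ∧ s.getD p 0 = z) ↔ z ∈ s := by
      intro z
      constructor
      · rintro ⟨p, -, hp2, hp3⟩
        have hp : p < s.length := by omega
        rw [← hp3, List.getD_eq_getElem s 0 hp]
        exact List.getElem_mem hp
      · intro hz
        obtain ⟨n, hn, hne⟩ := List.mem_iff_getElem.mp hz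
        exact ⟨n, by omega, by omega, by rw [List.getD_eq_getElem s 0 hn]; exact hne⟩
    rw [mem_pvTwoPtr s hs 0 (s.length - 1) PySem.Set.empty y (by omega)]
    rw [hidx y, hidx (-y), hmem y, hmem (-y)]
    simp [PySem.Set.empty]

-- ===== VERDICT (by name: the statement is the Claim_ definition above) =====
theorem process_array_spec : Claim_equal_process_array := by
  intro arr _
  unfold Spec_process_array
  rw [process_array_eq_map]
  simp only [process_array_alt]
  apply List.map_congr_left
  intro x hx
  have hA := mem_pairs_fold arr |x| arr PySem.Set.empty
  have he : (|x| ∈ (PySem.Set.empty : PySem.Set Int)) ↔ False := by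
    simp [PySem.Set.empty]
  rw [he, false_or] at hA
  have hB := mem_paired_char arr |x|
  by_cases hc : 0 < |x| ∧ |x| ∈ arr ∧ -|x| ∈ arr
  · rw [if_pos (hA.mpr ⟨hc.2.1, hc.1, hc.2.2⟩), if_pos (hB.mpr hc)]
  · rw [if_neg (fun hm => hc (by have := hA.mp hm; exact ⟨this.2.1, this.1, this.2.2⟩)),
        if_neg (fun hm => hc (hB.mp hm))]
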